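-- pv_equiv track=rewrite | github.com/collinsakenga/codewars_solutions | 6 kyu/Uncollapse Digits.py | uncollapse
-- ===== SOURCE A (Python) =====
-- check={'one', 'four', 'five', 'three', 'nine', 'two', 'zero', 'six', 'seven', 'eight'}
--
-- def uncollapse(digits):
--     res=[]
--     temp=""
--     for i in digits+" ":
--         if temp in check:
--             res.append(temp)
--             temp=i
--         else:
--             temp+=i
--     return " ".join(res)
-- ===== SOURCE B (Python) =====
-- WORDS = {'one', 'four', 'five', 'three', 'nine', 'two', 'zero', 'six', 'seven', 'eight'}
--
-- def uncollapse(digits):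
--     res = []
--     i = 0
--     n = len(digits)
--     while i < n:
--         for L in (3, 4, 5):
--             w = digits[i:i + L]
--             if w in WORDS:
--                 res.append(w)
--                 i += L
--                 break
--         else:
--             break
--     return " ".join(res)
-- ===== Notes on version B (the rewrite author's own statement) =====
-- stated objective: faster
-- what changed: A scans char by char, growing a temp string and flushing it whenever it equals a digit word (with a sentinel space appended); B keeps an index and at each position probes the slices of length 3, 4 and 5 against the word set, appending the first match and jumping past it, breaking when none matches - so B never builds a growing buffer, while A keeps concatenating one char at a time onto temp over a non-matching tail.
import Mathlib
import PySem

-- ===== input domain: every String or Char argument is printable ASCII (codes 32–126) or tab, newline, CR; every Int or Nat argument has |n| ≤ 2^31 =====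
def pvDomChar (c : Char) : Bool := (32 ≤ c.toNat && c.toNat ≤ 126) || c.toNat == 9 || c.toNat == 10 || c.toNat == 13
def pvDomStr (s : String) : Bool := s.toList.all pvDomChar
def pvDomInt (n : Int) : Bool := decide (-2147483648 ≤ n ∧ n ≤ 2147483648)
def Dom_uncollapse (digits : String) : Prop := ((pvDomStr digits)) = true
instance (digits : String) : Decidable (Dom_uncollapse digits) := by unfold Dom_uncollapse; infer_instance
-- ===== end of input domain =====

-- B replaces A's char-by-char accumulator scan with an index-jumping probe of the
-- three possible word lengths at each position (objective: faster — A regrows its temp string one char at a time across a non-matching tail; B slices at most 5 chars per step; a timing run measured B faster).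

-- ===== PORT A =====
-- the module-level set 'check' (words as char lists; strings are handled on the .toList side)
def pvCheckA : PySem.Set (List Char) :=
  PySem.Set.ofList [['o','n','e'], ['f','o','u','r'], ['f','i','v','e'], ['t','h','r','e','e'],
    ['n','i','n','e'], ['t','w','o'], ['z','e','r','o'], ['s','i','x'], ['s','e','v','e','n'],
    ['e','i','g','h','t']]

-- one iteration of A's for-loop body: state = (res, temp)
def pvStepA (st : List (List Char) × List Char) (c : Char) : List (List Char) × List Char :=
  if st.2 ∈ pvCheckA then (st.1 ++ [st.2], [c]) else (st.1, st.2 ++ [c])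

def uncollapse (digits : String) : String :=
  String.ofList (PySem.Chars.join [' '] ((digits.toList ++ [' ']).foldl pvStepA ([], [])).1)

-- ===== PORT B =====
-- B's module-level set 'WORDS' is the same set literal as A's 'check': shared as pvCheckA

-- every word in the set has length between 3 and 5 (used for termination of the while loop)
theorem pvCheck_len {u : List Char} (h : u ∈ pvCheckA) : 3 ≤ u.length ∧ u.length ≤ 5 := by
  simp only [pvCheckA, PySem.Set.mem_ofList, List.mem_cons, List.not_mem_nil, or_false] at h
  rcases h with h|h|h|h|h|h|h|h|h|h <;> subst h <;> decide

-- B's while loop over the index i, transcribed as recursion on the suffix digits[i:];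
-- the for-L-in-(3,4,5) probe is the unrolled if-chain
def pvGoB (l : List Char) : List (List Char) :=
  if h3 : l.take 3 ∈ pvCheckA then l.take 3 :: pvGoB (l.drop 3)
  else if h4 : l.take 4 ∈ pvCheckA then l.take 4 :: pvGoB (l.drop 4)
  else if h5 : l.take 5 ∈ pvCheckA then l.take 5 :: pvGoB (l.drop 5)
  else []
termination_by l.length
decreasing_by
  · have := (pvCheck_len h3).1; simp only [List.length_take, List.length_drop] at *; omega
  · have := (pvCheck_len h4).1; simp only [List.length_take, List.length_drop] at *; omega
  · have := (pvCheck_len h5).1; simp only [List.length_take, List.length_drop] at *; omega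

def uncollapse_alt (digits : String) : String :=
  String.ofList (PySem.Chars.join [' '] (pvGoB digits.toList))

-- ===== PRECONDITION & SPEC =====
def Spec_uncollapse (digits : String) (out : String) : Prop := out = uncollapse_alt digits
instance (digits : String) (out : String) : Decidable (Spec_uncollapse digits out) := by unfold Spec_uncollapse; infer_instance

-- ===== CLAIM (what is proved, stated in full; the proofs are below) =====
def Claim_equal_uncollapse : Prop := ∀ (digits : String), Dom_uncollapse digits → Spec_uncollapse digits (uncollapse digits)

-- ===== LEMMAS AND PROOFS =====

theorem pvGoB_nil : pvGoB [] = [] := by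
  rw [pvGoB]
  have : ([] : List Char) ∉ pvCheckA := by decide
  simp [this]

-- A's loop never appends again once no prefix of the rest matches a word
theorem pvNoAppend (d : List Char) : ∀ (res : List (List Char)) (t : List Char),
    (∀ u, u <+: d → t ++ u ∉ pvCheckA) →
    ((d ++ [' ']).foldl pvStepA (res, t)).1 = res := by
  induction d with
  | nil =>
    intro res t h
    have ht : t ∉ pvCheckA := by simpa using h [] List.nil_prefix
    simp [pvStepA, ht]
  | cons c d' ih =>
    intro res t h
    have ht : t ∉ pvCheckA := by simpa using h [] List.nil_prefix
    simp only [List.cons_append, List.foldl_cons, pvStepA, ht, if_false]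
    apply ih
    intro u hu
    have := h (c :: u) ((List.prefix_cons_inj c).mpr hu)
    simpa [List.append_assoc] using this

-- A's loop consumes one whole word: temp grows through the strict prefixes, then the word is emitted
theorem pvConsume (v : List Char) : ∀ (t : List Char) (res : List (List Char)) (c : Char)
    (rest : List Char), t ++ v ∈ pvCheckA → (∀ u, u <+: v → u ≠ v → t ++ u ∉ pvCheckA) →
    (v ++ c :: rest).foldl pvStepA (res, t) = rest.foldl pvStepA (res ++ [t ++ v], [c]) := by
  induction v with
  | nil =>
    intro t res c rest hmem _
    simp only [List.append_nil] at hmem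
    simp [pvStepA, hmem]
  | cons x v' ih =>
    intro t res c rest hmem hpr
    have ht : t ∉ pvCheckA := by
      simpa using hpr [] (List.nil_prefix) (by simp)
    simp only [List.cons_append, List.foldl_cons, pvStepA, ht, if_false]
    rw [show res ++ [t ++ x :: v'] = res ++ [(t ++ [x]) ++ v'] by simp]
    apply ih
    · simpa [List.append_assoc] using hmem
    · intro u hu hne
      have := hpr (x :: u) ((List.prefix_cons_inj x).mpr hu) (by simpa using hne)
      simpa [List.append_assoc] using this

theorem pvShort_not_mem {p : List Char} (h : p.length < 3) : p ∉ pvCheckA := by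
  intro hm; have := pvCheck_len hm; omega

-- one emission step: a word of length k starts at the current position (and no shorter one does)
theorem pvCase {n : Nat}
    (ih : ∀ (l : List Char) (res : List (List Char)) (t : List Char), l.length ≤ n →
      t <+: l → t.length ≤ 1 →
      ((l.drop t.length ++ [' ']).foldl pvStepA (res, t)).1 = res ++ pvGoB l)
    (l : List Char) (res : List (List Char)) (t : List Char)
    (hlen : l.length ≤ n + 1) (hpre : t <+: l) (ht1 : t.length ≤ 1)
    (k : Nat) (hk : 3 ≤ k ∧ k ≤ 5) (hkmem : l.take k ∈ pvCheckA)
    (hsmaller : ∀ m, 3 ≤ m → m < k → l.take m ∉ pvCheckA)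
    (hgo : pvGoB l = l.take k :: pvGoB (l.drop k)) :
    ((l.drop t.length ++ [' ']).foldl pvStepA (res, t)).1 = res ++ pvGoB l := by
  have hw3 := pvCheck_len hkmem
  have hwk : (l.take k).length ≤ k := by simp [List.length_take]
  have htw : t = (l.take k).take t.length := by
    rw [List.take_take, min_eq_left (by omega)]
    exact List.prefix_iff_eq_take.mp hpre
  have htv : t ++ (l.take k).drop t.length = l.take k := by
    conv_rhs => rw [← List.take_append_drop t.length (l.take k), ← htw]
  have hsplit : l.drop t.length = (l.take k).drop t.length ++ l.drop k := by
    conv_lhs => rw [← List.take_append_drop k l]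
    rw [List.drop_append_of_le_length (by omega)]
  have hpr : ∀ u, u <+: (l.take k).drop t.length → u ≠ (l.take k).drop t.length →
      t ++ u ∉ pvCheckA := by
    intro u hu hne hm
    have hul : u.length < ((l.take k).drop t.length).length := by
      rcases Nat.lt_or_ge u.length ((l.take k).drop t.length).length with h | h
      · exact h
      · exact absurd (hu.eq_of_length (le_antisymm hu.length_le h)) hne
    have hlt : (t ++ u).length < (l.take k).length := by
      simp only [List.length_drop] at hul
      simp only [List.length_append]
      omega
    have hpw : t ++ u <+: l.take k := htv ▸ (List.prefix_append_right_inj t).mpr hu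
    have hpl : t ++ u <+: l := hpw.trans (List.take_prefix k l)
    by_cases hshort : (t ++ u).length < 3
    · exact pvShort_not_mem hshort hm
    · exact hsmaller (t ++ u).length (by omega) (by omega)
        (List.prefix_iff_eq_take.mp hpl ▸ hm)
  rw [hgo]
  cases hdk : l.drop k with
  | nil =>
    rw [hsplit, hdk]
    simp only [List.append_nil]
    rw [show (l.take k).drop t.length ++ [' '] =
      (l.take k).drop t.length ++ ' ' :: [] from rfl]
    rw [pvConsume _ _ _ _ _ (by rw [htv]; exact hkmem) hpr, htv]
    simp [pvGoB_nil]
  | cons c l'' =>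
    rw [hsplit, hdk]
    rw [show (l.take k).drop t.length ++ (c :: l'') ++ [' '] =
      (l.take k).drop t.length ++ c :: (l'' ++ [' ']) by simp]
    rw [pvConsume _ _ _ _ _ (by rw [htv]; exact hkmem) hpr, htv]
    have hrec := ih (l.drop k) (res ++ [l.take k]) [c]
      (by simp only [List.length_drop]; omega)
      (by rw [hdk]; exact ⟨l'', rfl⟩) (by simp)
    rw [hdk] at hrec
    simpa using hrec

-- main loop correspondence: A's fold over the rest of the input (temp already holding the
-- at most one char consumed past the last emitted word) produces exactly B's word list
theorem pvMain (n : Nat) : ∀ (l : List Char) (res : List (List Char)) (t : List Char),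
    l.length ≤ n → t <+: l → t.length ≤ 1 →
    ((l.drop t.length ++ [' ']).foldl pvStepA (res, t)).1 = res ++ pvGoB l := by
  induction n with
  | zero =>
    intro l res t hlen hpre ht1
    have hl : l = [] := List.length_eq_zero_iff.mp (Nat.le_zero.mp hlen)
    subst hl
    have ht : t = [] := List.prefix_nil.mp hpre
    subst ht
    rw [pvGoB_nil]
    simpa using pvNoAppend [] res []
      (by intro u hu; rw [List.prefix_nil.mp hu]; exact pvShort_not_mem (by simp))
  | succ n ih =>
    intro l res t hlen hpre ht1
    have htake : t = l.take t.length := List.prefix_iff_eq_take.mp hpre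
    by_cases h3 : l.take 3 ∈ pvCheckA
    · exact pvCase ih l res t hlen hpre ht1 3 (by omega) h3
        (by intro m hm1 hm2; omega)
        (by rw [pvGoB]; simp [h3])
    · by_cases h4 : l.take 4 ∈ pvCheckA
      · exact pvCase ih l res t hlen hpre ht1 4 (by omega) h4
          (by intro m hm1 hm2; interval_cases m; exact h3)
          (by rw [pvGoB]; simp [h3, h4])
      · by_cases h5 : l.take 5 ∈ pvCheckA
        · exact pvCase ih l res t hlen hpre ht1 5 (by omega) h5
            (by intro m hm1 hm2
                interval_cases m
                · exact h3
                · exact h4)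
            (by rw [pvGoB]; simp [h3, h4, h5])
        · -- no word starts here: A absorbs the rest into temp and emits nothing more
          have hgo : pvGoB l = [] := by rw [pvGoB]; simp [h3, h4, h5]
          rw [hgo, List.append_nil]
          apply pvNoAppend
          intro u hu hm
          have hpl : t ++ u <+: l := by
            have h1 : t ++ u <+: t ++ l.drop t.length := (List.prefix_append_right_inj t).mpr hu
            have h2 : t ++ l.drop t.length = l := by
              conv_rhs => rw [← List.take_append_drop t.length l, ← htake]
            rwa [h2] at h1
          obtain ⟨ha, hb⟩ := pvCheck_len hm
          have heq : t ++ u = l.take (t ++ u).length := List.prefix_iff_eq_take.mp hpl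
          interval_cases hm3 : (t ++ u).length
          · exact h3 (heq ▸ hm)
          · exact h4 (heq ▸ hm)
          · exact h5 (heq ▸ hm)

theorem uncollapse_spec : Claim_equal_uncollapse := by
  intro digits _
  unfold Spec_uncollapse uncollapse uncollapse_alt
  have := pvMain digits.toList.length digits.toList [] [] le_rfl List.nil_prefix (by simp)
  simp only [List.length_nil, List.drop_zero, List.nil_append] at this
  rw [this]
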